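-- pv_equiv track=rewrite | github.com/TheNasaFx/algorithm-shinjilgee | 21.py | calculate_completion_time
-- ===== SOURCE A (Python) =====
-- def calculate_completion_time(programs, num_cpus, processes_per_cpu):
--     programs.sort(reverse=True)
--
--     cpus = [0] * num_cpus
--
--     for i, program_time in enumerate(programs):
--         cpu_index = i % num_cpus
--         cpus[cpu_index] += program_time
--
--     overall_completion_time = max(cpus)
--     return overall_completion_time
-- ===== SOURCE B (Python) =====
-- def calculate_completion_time(programs, num_cpus, processes_per_cpu):
--     # Same in-place descending sort as the original (observable mutation kept).
--     programs.sort(reverse=True)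
--     # CPU j ends up with the jobs at positions j, j+num_cpus, j+2*num_cpus, ...
--     # so its load is a strided sum; the answer is the largest such load.
--     return max(sum(programs[i] for i in range(j, len(programs), num_cpus))
--                for j in range(num_cpus))
-- ===== Notes on version B (the rewrite author's own statement) =====
-- stated objective: simpler
-- what changed: B replaces A's mutable bucket array filled by an enumerate/modular-index loop with a direct max over per-CPU strided sums (sum of positions j, j+num_cpus, ... after the same in-place descending sort).
import Mathlib
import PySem

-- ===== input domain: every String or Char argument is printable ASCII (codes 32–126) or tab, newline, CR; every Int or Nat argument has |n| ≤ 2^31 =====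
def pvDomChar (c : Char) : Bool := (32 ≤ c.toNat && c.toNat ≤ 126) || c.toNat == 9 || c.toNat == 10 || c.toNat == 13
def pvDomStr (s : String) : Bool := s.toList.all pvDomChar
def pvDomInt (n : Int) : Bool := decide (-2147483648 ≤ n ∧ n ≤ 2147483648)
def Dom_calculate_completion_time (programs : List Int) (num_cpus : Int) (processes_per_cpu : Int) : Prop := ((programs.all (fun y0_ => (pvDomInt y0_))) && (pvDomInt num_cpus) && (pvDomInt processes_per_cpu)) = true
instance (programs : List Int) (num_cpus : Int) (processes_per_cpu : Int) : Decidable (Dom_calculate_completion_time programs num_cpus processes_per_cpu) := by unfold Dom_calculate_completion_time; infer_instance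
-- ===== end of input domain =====

-- B replaces A's bucket array + modular-index loop by a max over per-CPU strided sums (simpler);
-- both Pythons sort `programs` in place (same mutation); equivalence proved about the return value.

-- ===== PORT A =====
def calculate_completion_time (programs : List Int) (num_cpus : Int) (processes_per_cpu : Int) : Int :=
  let s := PySem.List.sorted programs (fun x => x) true
  let cpus : List Int := PySem.List.pyRepeat [(0 : Int)] num_cpus
  let cpus2 := (PySem.List.enumerate s 0).foldl
    (fun c ip =>
      PySem.List.pySetD c (PySem.Int.mod ip.1 num_cpus)
        (PySem.List.pyGetD c (PySem.Int.mod ip.1 num_cpus) 0 + ip.2)) cpus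
  (PySem.List.max? cpus2 (fun x => x)).getD 0

-- ===== PORT B =====
def calculate_completion_time_alt (programs : List Int) (num_cpus : Int) (processes_per_cpu : Int) : Int :=
  let s := PySem.List.sorted programs (fun x => x) true
  (PySem.List.max?
    ((PySem.List.pyRange 0 num_cpus 1).map
      (fun j => ((PySem.List.pyRange j (PySem.List.len s) num_cpus).map
        (fun i => PySem.List.pyGetD s i 0)).sum))
    (fun x => x)).getD 0

-- ===== PRECONDITION & SPEC =====
-- Pre_ excludes exactly num_cpus ≤ 0, where Python A raises (ZeroDivisionError/IndexError/ValueError).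
def Pre_calculate_completion_time (programs : List Int) (num_cpus : Int) (processes_per_cpu : Int) : Prop :=
  1 ≤ num_cpus
instance (programs : List Int) (num_cpus : Int) (processes_per_cpu : Int) : Decidable (Pre_calculate_completion_time programs num_cpus processes_per_cpu) := by unfold Pre_calculate_completion_time; infer_instance

def pvWitness_calculate_completion_time : List Int × Int × Int := ([3, 1, 2], 2, 5)

def Spec_calculate_completion_time (programs : List Int) (num_cpus : Int) (processes_per_cpu : Int) (out : Int) : Prop := out = calculate_completion_time_alt programs num_cpus processes_per_cpu
instance (programs : List Int) (num_cpus : Int) (processes_per_cpu : Int) (out : Int) : Decidable (Spec_calculate_completion_time programs num_cpus processes_per_cpu out) := by unfold Spec_calculate_completion_time; infer_instance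

-- ===== CLAIM (what is proved, stated in full; the proofs are below) =====
def Claim_equal_calculate_completion_time : Prop := ∀ (programs : List Int) (num_cpus : Int) (processes_per_cpu : Int), Dom_calculate_completion_time programs num_cpus processes_per_cpu → Pre_calculate_completion_time programs num_cpus processes_per_cpu → Spec_calculate_completion_time programs num_cpus processes_per_cpu (calculate_completion_time programs num_cpus processes_per_cpu)

-- ===== LEMMAS AND PROOFS =====

-- sum of the elements of s at positions j, j+k, j+2k, …
def strideSum (k : Nat) : List Int → Nat → Int
  | [], _ => 0
  | a :: t, 0 => a + strideSum k t (k - 1)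
  | _ :: t, j + 1 => strideSum k t j

-- A's round-robin loop with an explicit rotating bucket pointer (no %)
def loopA (k : Nat) : List Int → List Int → Nat → List Int
  | [], c, _ => c
  | a :: t, c, p => loopA k t (c.set p (c.getD p 0 + a)) (if p + 1 = k then 0 else p + 1)

-- which stride offset bucket j sees when the pointer is at p
def delay (k p j : Nat) : Nat := if p ≤ j then j - p else j + k - p

lemma strideSum_drop (k : Nat) : ∀ (j : Nat) (s : List Int), strideSum k s j = strideSum k (s.drop j) 0 := by
  intro j
  induction j with
  | zero => intro s; simp
  | succ j ih =>
    intro s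
    cases s with
    | nil => simp [strideSum]
    | cons a t => simpa [strideSum] using ih t

lemma succ_mod (k n : Nat) (hk : 0 < k) :
    (n + 1) % k = if n % k + 1 = k then 0 else n % k + 1 := by
  rcases Nat.lt_or_ge 1 k with h2 | h2
  · have hlt : n % k < k := Nat.mod_lt n hk
    rw [Nat.add_mod, Nat.mod_eq_of_lt h2]
    split_ifs with h
    · rw [h, Nat.mod_self]
    · exact Nat.mod_eq_of_lt (by omega)
  · have hk1 : k = 1 := by omega
    subst hk1; simp [Nat.mod_one]

lemma foldA_eq_loopA (k : Nat) (hk : 0 < k) :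
    ∀ (s : List Int) (n : Nat) (c : List Int),
      (PySem.List.enumerate s (n : Int)).foldl
        (fun c ip =>
          PySem.List.pySetD c (PySem.Int.mod ip.1 (k : Int))
            (PySem.List.pyGetD c (PySem.Int.mod ip.1 (k : Int)) 0 + ip.2)) c
      = loopA k s c (n % k) := by
  intro s
  induction s with
  | nil => intro n c; simp [PySem.List.enumerate_nil, loopA]
  | cons a t ih =>
    intro n c
    rw [PySem.List.enumerate_cons, List.foldl_cons]
    have hcast : ((n : Int) + 1) = ((n + 1 : Nat) : Int) := by push_cast; ring
    rw [hcast, ih (n + 1)]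
    simp only [PySem.Int.mod_natCast, PySem.List.pySetD_natCast, PySem.List.pyGetD_natCast,
      loopA]
    rw [succ_mod k n hk]

lemma loopA_eq_map (k : Nat) (hk : 0 < k) :
    ∀ (s : List Int) (c : List Int) (p : Nat), p < k → c.length = k →
      loopA k s c p = (List.range k).map (fun j => c.getD j 0 + strideSum k s (delay k p j)) := by
  intro s
  induction s with
  | nil =>
    intro c p hp hc
    have hmap : (List.range k).map (fun j => c.getD j 0 + strideSum k [] (delay k p j))
        = (List.range k).map (fun j => c.getD j 0) := by
      apply List.map_congr_left
      intro j _
      simp [strideSum]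
    rw [loopA, hmap]
    apply List.ext_getElem (by simp [hc])
    intro i h1 h2
    simp only [List.getElem_map, List.getElem_range]
    exact (List.getD_eq_getElem c 0 h1).symm
  | cons a t ih =>
    intro c p hp hc
    have hp' : (if p + 1 = k then 0 else p + 1) < k := by split_ifs <;> omega
    have hc' : (c.set p (c.getD p 0 + a)).length = k := by simpa using hc
    rw [loopA, ih _ _ hp' hc']
    apply List.map_congr_left
    intro j hj
    have hjk : j < k := List.mem_range.mp hj
    by_cases hjp : j = p
    · subst hjp
      have hset : ∀ v : Int, (c.set j v).getD j 0 = v := by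
        intro v
        rw [List.getD_eq_getElem _ 0 (by simp [hc]; omega)]
        simp
      have hd0 : delay k j j = 0 := by simp [delay]
      have hd1 : delay k (if j + 1 = k then 0 else j + 1) j = k - 1 := by
        unfold delay; split_ifs <;> omega
      rw [hset, hd0, hd1, strideSum]
      ring
    · have hset : ∀ v : Int, (c.set p v).getD j 0 = c.getD j 0 := by
        intro v
        rw [List.getD_eq_getElem _ 0 (by simp [hc]; omega), List.getD_eq_getElem _ 0 (by omega)]
        exact List.getElem_set_ne (by omega) _
      have hd : 1 ≤ delay k p j := by unfold delay; split_ifs <;> omega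
      have hd' : delay k (if p + 1 = k then 0 else p + 1) j = delay k p j - 1 := by
        unfold delay; split_ifs <;> omega
      have hsucc : delay k p j = (delay k p j - 1) + 1 := by omega
      rw [hset, hd', hsucc, strideSum]
      simp only [Nat.add_sub_cancel]

lemma pyRange_pos_cons (a b st : Int) (hst : 0 < st) (hab : a < b) :
    PySem.List.pyRange a b st = a :: PySem.List.pyRange (a + st) b st := by
  rw [PySem.List.pyRange_of_pos _ _ hst, PySem.List.pyRange_of_pos _ _ hst]
  have h1 : b - a + st - 1 = (b - a - 1) + 1 * st := by ring
  have h2 : ((b - a + st - 1) / st) = (b - a - 1) / st + 1 := by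
    rw [h1, Int.add_mul_ediv_right _ _ (by omega)]
  by_cases h3 : a + st < b
  · have h4 : b - (a + st) + st - 1 = b - a - 1 := by ring
    have h5 : 0 ≤ (b - a - 1) / st := Int.ediv_nonneg (by omega) (by omega)
    simp only [if_pos hab, if_pos h3, h4, h2]
    have h6 : ((b - a - 1) / st + 1).toNat = ((b - a - 1) / st).toNat + 1 := by omega
    rw [h6, List.range_succ_eq_map]
    simp only [List.map_cons, List.map_map, Nat.cast_zero, mul_zero, add_zero]
    congr 1
    apply List.map_congr_left
    intro r _
    simp only [Function.comp_apply]
    push_cast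
    ring
  · have h7 : (b - a - 1) / st = 0 := Int.ediv_eq_zero_of_lt (by omega) (by omega)
    simp [if_pos hab, if_neg h3, h2, h7]

lemma strided_sum_eq (k : Nat) (hk : 0 < k) (s : List Int) :
    ∀ (m j : Nat), s.length - j ≤ m →
      ((PySem.List.pyRange (j : Int) (s.length : Int) (k : Int)).map
        (fun i => PySem.List.pyGetD s i 0)).sum = strideSum k (s.drop j) 0 := by
  intro m
  induction m with
  | zero =>
    intro j hj
    have hle : s.length ≤ j := by omega
    rw [PySem.List.pyRange_of_pos _ _ (by exact_mod_cast hk)]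
    rw [if_neg (by exact_mod_cast Nat.not_lt.mpr hle)]
    simp [List.drop_eq_nil_of_le hle, strideSum]
  | succ m ih =>
    intro j hj
    by_cases hlt : j < s.length
    · rw [pyRange_pos_cons _ _ _ (by exact_mod_cast hk) (by exact_mod_cast hlt)]
      have hcast : ((j : Int) + (k : Int)) = ((j + k : Nat) : Int) := by push_cast; ring
      rw [List.map_cons, List.sum_cons, hcast, ih (j + k) (by omega)]
      have hget : PySem.List.pyGetD s (j : Int) 0 = s[j] := by
        rw [PySem.List.pyGetD_natCast]
        exact List.getD_eq_getElem s 0 hlt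
      rw [hget]
      have h1 : s.drop j = s[j] :: s.drop (j + 1) := List.drop_eq_getElem_cons hlt
      rw [h1, strideSum]
      have h2 : strideSum k (s.drop (j + 1)) (k - 1)
          = strideSum k ((s.drop (j + 1)).drop (k - 1)) 0 := strideSum_drop k (k - 1) _
      rw [h2, List.drop_drop]
      have h3 : j + 1 + (k - 1) = j + k := by omega
      rw [h3]
    · rw [PySem.List.pyRange_of_pos _ _ (by exact_mod_cast hk)]
      rw [if_neg (by exact_mod_cast Nat.not_lt.mpr (by omega : s.length ≤ j))]
      simp [List.drop_eq_nil_of_le (by omega : s.length ≤ j), strideSum]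

-- ===== VERDICT (by name: the statement is the Claim_ definition above) =====
theorem calculate_completion_time_spec : Claim_equal_calculate_completion_time := by
  intro programs num_cpus ppc _ hpre
  unfold Pre_calculate_completion_time at hpre
  obtain ⟨k, rfl⟩ : ∃ k : Nat, num_cpus = (k : Int) := ⟨num_cpus.toNat, by omega⟩
  have hk : 0 < k := by omega
  unfold Spec_calculate_completion_time calculate_completion_time calculate_completion_time_alt
  simp only []
  set s := PySem.List.sorted programs (fun x => x) true with hs
  -- A side
  have hrep : PySem.List.pyRepeat [(0 : Int)] (k : Int) = List.replicate k (0 : Int) := by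
    rw [PySem.List.pyRepeat_singleton, Int.toNat_natCast]
  have hfold := foldA_eq_loopA k hk s 0 (List.replicate k 0)
  rw [Nat.cast_zero] at hfold
  rw [hrep, hfold, Nat.zero_mod, loopA_eq_map k hk s _ 0 hk (List.length_replicate)]
  have hAlist : (List.range k).map (fun j => (List.replicate k (0 : Int)).getD j 0 + strideSum k s (delay k 0 j))
      = (List.range k).map (fun j => strideSum k s j) := by
    apply List.map_congr_left
    intro j hj
    have hjk : j < k := List.mem_range.mp hj
    rw [List.getD_eq_getElem _ 0 (by simpa using hjk)]
    simp [delay]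
  rw [hAlist]
  -- B side
  have hBlist : (PySem.List.pyRange 0 (k : Int) 1).map
      (fun j => ((PySem.List.pyRange j (PySem.List.len s) (k : Int)).map
        (fun i => PySem.List.pyGetD s i 0)).sum)
      = (List.range k).map (fun j => strideSum k s j) := by
    rw [PySem.List.pyRange_zero_natCast, List.map_map]
    apply List.map_congr_left
    intro j _
    simp only [Function.comp_apply, PySem.List.len_eq]
    rw [strided_sum_eq k hk s s.length j (by omega), ← strideSum_drop]
  rw [hBlist]
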